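-- pv_equiv track=rewrite | github.com/bloggerwang1217/clef | src/score/sanitize_kern.py | _count_spine_change
-- ===== SOURCE A (Python) =====
-- def _count_spine_change(line: str) -> int:
--     """Count spine change from a line containing *^ or *v.
--
--     Args:
--         line: A line that may contain spine split (*^) or merge (*v)
--
--     Returns:
--         Net change in spine count (positive for split, negative for merge)
--     """
--     if not line.startswith('*') or line.startswith('**'):
--         return 0
--
--     parts = line.split('\t')
--     change = 0
--     i = 0
--     while i < len(parts):
--         if parts[i] == '*^':
--             change += 1  # One spine becomes two
--         elif parts[i] == '*v':
--             # Count consecutive *v tokens (they merge into one)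
--             merge_count = 0
--             while i < len(parts) and parts[i] == '*v':
--                 merge_count += 1
--                 i += 1
--             change -= (merge_count - 1)  # N spines become 1
--             continue
--         i += 1
--     return change
-- ===== SOURCE B (Python) =====
-- def _count_spine_change(line: str) -> int:
--     if not line.startswith('*') or line.startswith('**'):
--         return 0
--     parts = line.split('\t')
--     # closed-form counting: each '*^' adds 1; a run of k '*v' tokens contributes
--     # -(k-1) = (#run starts) - (#'*v' tokens), so:
--     run_starts = sum(cur == '*v' and prev != '*v'
--                      for prev, cur in zip([''] + parts, parts))
--     return parts.count('*^') - parts.count('*v') + run_starts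
-- ===== Notes on version B (the rewrite author's own statement) =====
-- stated objective: alternative
-- what changed: Replaced A's nested stateful run-consuming while loop by a closed-form counting formula: change = count('*^') - count('*v') + (number of '*v' run starts), where run starts are counted by a pairwise zip of the token list with its shifted self.
import Mathlib
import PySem

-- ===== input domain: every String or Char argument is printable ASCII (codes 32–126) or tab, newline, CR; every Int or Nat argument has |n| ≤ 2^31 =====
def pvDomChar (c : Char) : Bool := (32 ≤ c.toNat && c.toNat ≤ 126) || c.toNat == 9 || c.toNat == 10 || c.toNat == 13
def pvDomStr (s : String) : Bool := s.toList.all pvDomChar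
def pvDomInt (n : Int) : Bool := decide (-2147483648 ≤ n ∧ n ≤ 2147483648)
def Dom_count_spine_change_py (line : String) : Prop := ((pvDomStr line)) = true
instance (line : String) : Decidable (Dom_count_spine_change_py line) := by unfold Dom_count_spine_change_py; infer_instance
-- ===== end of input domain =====

-- B replaces A's nested run-consuming while loop by a closed-form counting formula
-- (count('*^') - count('*v') + number of '*v' run starts); alternative decomposition, same cost.

-- ===== PORT A =====
-- inner `while i < len(parts) and parts[i] == '*v'` starting at the element AFTER the matched one:
-- returns (number of further leading "*v" tokens, remaining list)
def aConsume : List String → Nat × List String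
  | [] => (0, [])
  | p :: rest =>
    if p = "*v" then
      let r := aConsume rest
      (r.1 + 1, r.2)
    else (0, p :: rest)

theorem aConsume_snd_le : ∀ (l : List String), (aConsume l).2.length ≤ l.length := by
  intro l
  induction l with
  | nil => simp [aConsume]
  | cons p rest ih =>
    simp only [aConsume]
    split
    · simpa using Nat.le_succ_of_le ih
    · simp

-- the outer while loop over `parts` (index i becomes the remaining suffix)
def aLoop : List String → Int
  | [] => 0
  | p :: rest =>
    if p = "*^" then 1 + aLoop rest
    else if p = "*v" then
      let r := aConsume rest
      (-(((r.1 + 1 : Nat) : Int) - 1)) + aLoop r.2   -- merge_count = r.1 + 1; change -= merge_count - 1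
    else aLoop rest
termination_by l => l.length
decreasing_by
  · simp
  · exact Nat.lt_succ_of_le (aConsume_snd_le rest)
  · simp

def count_spine_change_py (line : String) : Int :=
  if !(PySem.Str.startswith line "*") || PySem.Str.startswith line "**" then 0
  else aLoop ((PySem.Str.split? line "\t").getD [])  -- sep "\t" ≠ "", so split? is always some

-- ===== PORT B =====
-- run_starts = sum(cur == '*v' and prev != '*v' for prev, cur in zip([''] + parts, parts))
def bRunStarts (parts : List String) : Int :=
  (List.zip ("" :: parts) parts).foldl
    (fun acc pc => if pc.2 = "*v" ∧ ¬ pc.1 = "*v" then acc + 1 else acc) 0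

def count_spine_change_py_alt (line : String) : Int :=
  if !(PySem.Str.startswith line "*") || PySem.Str.startswith line "**" then 0
  else
    let parts := (PySem.Str.split? line "\t").getD []
    (PySem.List.count parts "*^") - (PySem.List.count parts "*v") + bRunStarts parts

-- ===== PRECONDITION & SPEC =====
def Spec_count_spine_change_py (line : String) (out : Int) : Prop := out = count_spine_change_py_alt line
instance (line : String) (out : Int) : Decidable (Spec_count_spine_change_py line out) := by unfold Spec_count_spine_change_py; infer_instance

-- ===== CLAIM (what is proved, stated in full; the proofs are below) =====
def Claim_equal_count_spine_change_py : Prop := ∀ (line : String), Dom_count_spine_change_py line → Spec_count_spine_change_py line (count_spine_change_py line)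

-- ===== LEMMAS AND PROOFS =====

-- recursive characterisation of the run-start count; the flag says 'previous token was "*v"'
def runS (b : Bool) : List String → Int
  | [] => 0
  | x :: xs => (if x = "*v" ∧ b = false then 1 else 0) + runS (x == "*v") xs

theorem foldl_runS (l : List String) : ∀ (p : String) (acc : Int),
    (List.zip (p :: l) l).foldl
      (fun acc pc => if pc.2 = "*v" ∧ ¬ pc.1 = "*v" then acc + 1 else acc) acc
    = acc + runS (p == "*v") l := by
  induction l with
  | nil => intro p acc; simp [runS]
  | cons x xs ih =>
    intro p acc
    simp only [List.zip_cons_cons, List.foldl_cons, runS]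
    rw [ih x]
    by_cases hp : p = "*v" <;> by_cases hx : x = "*v" <;> simp [hp, hx] <;> try ring

theorem bRunStarts_eq (parts : List String) : bRunStarts parts = runS false parts := by
  unfold bRunStarts
  rw [foldl_runS]
  simp

-- runS with flag true skips a leading all-"*v" run
theorem runS_true_vrun (pre rest : List String) (h : ∀ y ∈ pre, y = "*v") :
    runS true (pre ++ rest) = runS true rest := by
  induction pre with
  | nil => rfl
  | cons y ys ih =>
    have hy : y = "*v" := h y (List.mem_cons_self ..)
    simp only [List.cons_append, runS, hy]
    simpa using ih (fun z hz => h z (List.mem_cons_of_mem _ hz))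

-- when the head is not "*v", the flag does not matter
theorem runS_flag (l : List String) (h : ∀ x, l.head? = some x → x ≠ "*v") :
    runS true l = runS false l := by
  cases l with
  | nil => rfl
  | cons x xs =>
    have hx : x ≠ "*v" := h x rfl
    simp [runS, hx]

-- counts over a list of all-equal elements
theorem count_all_eq (pre : List String) (x v : String) (h : ∀ y ∈ pre, y = x) :
    pre.count v = if v = x then pre.length else 0 := by
  induction pre with
  | nil => simp
  | cons y ys ih =>
    have hy : y = x := h y (List.mem_cons_self ..)
    rw [List.count_cons, ih (fun z hz => h z (List.mem_cons_of_mem _ hz))]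
    subst hy
    by_cases hv : v = y
    · subst hv; simp
    · simp [hv, Ne.symm hv]

-- aConsume is takeWhile/dropWhile on "*v" (used to split the consumed run)
theorem aConsume_eq (l : List String) :
    aConsume l = ((l.takeWhile (· == "*v")).length, l.dropWhile (· == "*v")) := by
  induction l with
  | nil => simp [aConsume]
  | cons p rest ih =>
    by_cases hp : p = "*v"
    · simp [aConsume, hp, ih]
    · simp [aConsume, hp]


-- main: aLoop = #'*^' − #'*v' + run starts
theorem aLoop_eq : ∀ (N : Nat) (l : List String), l.length ≤ N →
    ∀ (b : Bool), (∀ x, l.head? = some x → (b = true → x ≠ "*v")) →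
    aLoop l = (l.count "*^" : Int) - (l.count "*v" : Int) + runS b l := by
  intro N
  induction N with
  | zero =>
    intro l hlen b _
    have : l = [] := List.length_eq_zero_iff.mp (Nat.le_zero.mp hlen)
    subst this; simp [aLoop, runS]
  | succ N ih =>
    intro l hlen b hhead
    match l with
    | [] => simp [aLoop, runS]
    | x :: xs =>
      by_cases hx1 : x = "*^"
      · subst hx1
        rw [aLoop, if_pos rfl, ih xs (by simpa using hlen) false (fun _ _ hf => by cases hf),
          show runS b ("*^" :: xs) = runS false xs from by simp [runS]]
        simp
        ring
      · by_cases hx2 : x = "*v"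
        · subst hx2
          have hb : b = false := by
            by_contra hb
            exact (hhead _ rfl (by simpa using hb)) rfl
          have hsplit : xs.takeWhile (· == "*v") ++ xs.dropWhile (· == "*v") = xs :=
            List.takeWhile_append_dropWhile
          set pre := xs.takeWhile (· == "*v") with hpre
          set rest := xs.dropWhile (· == "*v") with hrest
          have hpre_all : ∀ y ∈ pre, y = "*v" := by
            intro y hy; have := List.mem_takeWhile_imp hy; simpa using this
          have hrest_len : rest.length ≤ N := by
            have h1 : rest.length ≤ xs.length := List.length_dropWhile_le _ _
            have h2 : xs.length + 1 ≤ N + 1 := by simpa using hlen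
            omega
          have hrest_head : ∀ z, rest.head? = some z → z ≠ "*v" := by
            intro z hz hcontra
            have hd := List.head?_dropWhile_not (· == "*v") xs
            rw [← hrest, hz] at hd
            simp at hd
            exact hd hcontra
          have hcons : aConsume xs = (pre.length, rest) := by
            rw [aConsume_eq, hpre, hrest]
          have hA : aLoop ("*v" :: xs) = -(((pre.length + 1 : Nat) : Int) - 1) + aLoop rest := by
            rw [aLoop, if_neg (by decide), if_pos rfl]
            show -((((aConsume xs).1 + 1 : Nat) : Int) - 1) + aLoop (aConsume xs).2 = _
            rw [hcons]
          have hrec := ih rest hrest_len false (by intro z hz hf; cases hf)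
          rw [hA, hrec]
          have hcV : xs.count "*v" = pre.length + rest.count "*v" := by
            conv_lhs => rw [← hsplit]
            rw [List.count_append, count_all_eq pre "*v" "*v" hpre_all]
            simp
          have hcH : xs.count "*^" = rest.count "*^" := by
            conv_lhs => rw [← hsplit]
            rw [List.count_append, count_all_eq pre "*v" "*^" hpre_all]
            simp
          have hS : runS b ("*v" :: xs) = 1 + runS false rest := by
            rw [hb]
            simp only [runS]
            rw [show (("*v" : String) == "*v") = true by simp, ← hsplit,
              runS_true_vrun pre rest hpre_all, runS_flag rest hrest_head]
            simp
          rw [hS, List.count_cons, List.count_cons, hcV, hcH]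
          simp
          ring
        · rw [aLoop, if_neg hx1, if_neg hx2,
            ih xs (by simpa using hlen) (x == "*v")
              (by intro z hz hf
                  -- flag (x == "*v") = true contradicts hx2
                  simp [hx2] at hf)]
          have : runS b (x :: xs) = runS (x == "*v") xs := by
            simp [runS, hx2]
          rw [this, List.count_cons, List.count_cons]
          simp [hx1, hx2, Ne.symm]

-- ===== VERDICT (by name: the statement is the Claim_ definition above) =====
theorem count_spine_change_py_spec : Claim_equal_count_spine_change_py := by
  intro line _
  unfold Spec_count_spine_change_py count_spine_change_py count_spine_change_py_alt
  split
  · rfl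
  · set parts := (PySem.Str.split? line "\t").getD []
    have h := aLoop_eq parts.length parts le_rfl false (fun _ _ hf => by cases hf)
    show aLoop parts = ((PySem.List.count parts "*^" : Int)) - (PySem.List.count parts "*v" : Int) + bRunStarts parts
    rw [h, bRunStarts_eq, PySem.List.count_eq, PySem.List.count_eq]
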